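-- pv_equiv track=rewrite | github.com/fygar256/axx | axx.refactored.py | get_curlb
-- ===== SOURCE A (Python) =====
-- def skipspc(s, idx):
--     """Skip spaces in string"""
--     while idx < len(s) and s[idx] == ' ':
--         idx += 1
--     return idx
--
-- def get_curlb(s, idx):
--     """Get curly bracket content"""
--     idx = skipspc(s, idx)
--     f = False
--     t = ''
--
--     if idx < len(s) and s[idx] == '{':
--         idx += 1
--         f = True
--         idx = skipspc(s, idx)
--         while idx < len(s) and s[idx] != '}':
--             t += s[idx]
--             idx += 1
--         idx = skipspc(s, idx)
--         if idx < len(s) and s[idx] == '}':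
--             idx += 1
--
--     return f, t, idx
-- ===== SOURCE B (Python) =====
-- def get_curlb(s, idx):
--     """Get curly bracket content"""
--     rest = s[idx:]
--     inner = rest.lstrip(' ')
--     if not inner.startswith('{'):
--         return False, '', idx + len(rest) - len(inner)
--     body = inner[1:].lstrip(' ')
--     t, _sep, post = body.partition('}')
--     return True, t, len(s) - len(post)
-- ===== Notes on version B (the rewrite author's own statement) =====
-- stated objective: simpler
-- what changed: Replaces the three hand-written index-stepping while loops with direct string operations (slice, lstrip(' '), startswith, partition('}')) so the result is computed from whole substrings instead of a scanned index. Pre_ excludes negative idx: a scan position below 0 is outside the function's contract — A raises IndexError for idx < -len(s), and for -len(s) <= idx < 0 A scans via Python's negative-index wraparound while B slices from the end; both corner behaviours are equally defensible and no caller would specify either.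
-- outside the precondition, e.g. on get_curlb('  ', -1): A returns (False, '', 2), B returns (False, '', 0); on get_curlb('  {x}', -3): A returns (True, 'x', 0), B returns (True, 'x', 5)
import Mathlib
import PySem

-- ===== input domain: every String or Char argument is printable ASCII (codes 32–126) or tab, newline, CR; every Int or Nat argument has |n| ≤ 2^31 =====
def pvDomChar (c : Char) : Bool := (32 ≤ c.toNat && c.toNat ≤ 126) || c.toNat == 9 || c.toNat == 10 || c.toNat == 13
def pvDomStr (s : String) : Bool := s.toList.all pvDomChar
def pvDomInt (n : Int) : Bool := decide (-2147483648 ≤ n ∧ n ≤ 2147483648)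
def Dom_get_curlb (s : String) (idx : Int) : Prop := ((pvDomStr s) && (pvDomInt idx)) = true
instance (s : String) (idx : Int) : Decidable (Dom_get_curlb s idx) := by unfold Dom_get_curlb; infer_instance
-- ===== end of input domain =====

-- B replaces A's three index-stepping while loops with whole-substring operations
-- (slice / lstrip(' ') / startswith / partition('}')): simpler, same O(n) cost.

-- ===== PORT A =====
-- while idx < len(s) and s[idx] == ' ': idx += 1
def pvSkipspc (cs : List Char) (idx : Int) : Int :=
  if h : idx < (cs.length : Int) ∧ PySem.List.pyGet? cs idx = some ' ' then
    pvSkipspc cs (idx + 1)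
  else idx
termination_by ((cs.length : Int) - idx).toNat
decreasing_by omega

-- while idx < len(s) and s[idx] != '}': t += s[idx]; idx += 1
-- (the 'none' branch of pyGet? is where Python raises IndexError; unreachable for 0 ≤ idx)
def pvCollect (cs : List Char) (idx : Int) (t : List Char) : List Char × Int :=
  if h : idx < (cs.length : Int) then
    match PySem.List.pyGet? cs idx with
    | some c => if c = '}' then (t, idx) else pvCollect cs (idx + 1) (t ++ [c])
    | none => (t, idx)
  else (t, idx)
termination_by ((cs.length : Int) - idx).toNat
decreasing_by omega

def get_curlb (s : String) (idx : Int) : Bool × String × Int :=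
  let cs := s.toList
  let i1 := pvSkipspc cs idx
  if i1 < (cs.length : Int) ∧ PySem.List.pyGet? cs i1 = some '{' then
    let i2 := i1 + 1
    let i3 := pvSkipspc cs i2
    let r := pvCollect cs i3 []
    let i5 := pvSkipspc cs r.2
    let i6 := if i5 < (cs.length : Int) ∧ PySem.List.pyGet? cs i5 = some '}' then i5 + 1 else i5
    (true, String.ofList r.1, i6)
  else (false, "", i1)

-- ===== PORT B =====
def get_curlb_alt (s : String) (idx : Int) : Bool × String × Int :=
  let cs := s.toList
  let rest := PySem.List.slice cs (some idx) none
  let inner := rest.dropWhile (· == ' ')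
  if PySem.Chars.startswith inner ['{'] then
    let body := (inner.drop 1).dropWhile (· == ' ')
    let t := body.takeWhile (fun c => ¬ (c == '}'))
    let post := (body.dropWhile (fun c => ¬ (c == '}'))).drop 1
    (true, String.ofList t, (cs.length : Int) - post.length)
  else (false, "", idx + (rest.length : Int) - (inner.length : Int))

-- ===== PRECONDITION & SPEC =====
-- Pre_ excludes negative idx: a scan position below 0 is outside the function's contract — A raises
-- IndexError for idx < -len(s), and for -len(s) ≤ idx < 0 A scans via Python's negative-index
-- wraparound while B slices from the end; both corner behaviours are equally defensible and no
-- caller would specify either.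
def Pre_get_curlb (s : String) (idx : Int) : Prop := 0 ≤ idx
instance (s : String) (idx : Int) : Decidable (Pre_get_curlb s idx) := by unfold Pre_get_curlb; infer_instance
def pvWitness_get_curlb : String × Int := ("  { ab } c", 0)
def Spec_get_curlb (s : String) (idx : Int) (out : Bool × String × Int) : Prop := out = get_curlb_alt s idx
instance (s : String) (idx : Int) (out : Bool × String × Int) : Decidable (Spec_get_curlb s idx out) := by unfold Spec_get_curlb; infer_instance

-- ===== CLAIM (what is proved, stated in full; the proofs are below) =====
def Claim_equal_get_curlb : Prop := ∀ (s : String) (idx : Int), Dom_get_curlb s idx → Pre_get_curlb s idx → Spec_get_curlb s idx (get_curlb s idx)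

-- ===== LEMMAS AND PROOFS =====
theorem pvDropWhile_eq_drop {α : Type} (l : List α) (p : α → Bool) :
    l.dropWhile p = l.drop (l.takeWhile p).length := by
  induction l with
  | nil => simp
  | cons a t ih => by_cases h : p a <;> simp [h, ih]

theorem pvSkipspc_nat (cs : List Char) (k : Nat) :
    pvSkipspc cs (k : Int) = ((k + ((cs.drop k).takeWhile (fun c => c == ' ')).length : Nat) : Int) := by
  generalize hn : cs.length - k = n
  induction n generalizing k with
  | zero =>
    have hk : cs.length ≤ k := by omega
    rw [pvSkipspc]
    simp [List.drop_eq_nil_of_le hk, show ¬ ((k:Int) < cs.length) by exact_mod_cast not_lt.mpr hk]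
  | succ n ih =>
    have hk : k < cs.length := by omega
    rw [pvSkipspc]
    rw [List.drop_eq_getElem_cons hk]
    by_cases hc : cs[k] = ' '
    · rw [dif_pos ⟨by exact_mod_cast hk, by simp [PySem.List.pyGet?_natCast, List.getElem?_eq_getElem hk, hc]⟩]
      have h1 : ((k:Int) + 1) = ((k+1 : Nat) : Int) := by push_cast; ring
      rw [h1, ih (k+1) (by omega), List.takeWhile_cons]
      simp [hc]; omega
    · rw [dif_neg, List.takeWhile_cons]
      · simp [hc]
      · simp [PySem.List.pyGet?_natCast, List.getElem?_eq_getElem hk, hc]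

theorem pvCollect_nat (cs : List Char) (k : Nat) (t : List Char) :
    pvCollect cs (k : Int) t =
      (t ++ (cs.drop k).takeWhile (fun c => ¬ (c == '}')),
       ((k + ((cs.drop k).takeWhile (fun c => ¬ (c == '}'))).length : Nat) : Int)) := by
  generalize hn : cs.length - k = n
  induction n generalizing k t with
  | zero =>
    have hk : cs.length ≤ k := by omega
    rw [pvCollect]
    simp [List.drop_eq_nil_of_le hk, show ¬ ((k:Int) < cs.length) by exact_mod_cast not_lt.mpr hk]
  | succ n ih =>
    have hk : k < cs.length := by omega
    rw [pvCollect, dif_pos (by exact_mod_cast hk)]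
    rw [List.drop_eq_getElem_cons hk]
    simp only [PySem.List.pyGet?_natCast, List.getElem?_eq_getElem hk, List.takeWhile_cons]
    by_cases hc : cs[k] = '}'
    · simp [hc]
    · have h1 : ((k:Int) + 1) = ((k+1 : Nat) : Int) := by push_cast; ring
      simp only [hc]
      rw [h1, ih (k+1) _ (by omega)]
      simp [hc]; omega

theorem get_curlb_eq (s : String) (idx : Int) (hpre : 0 ≤ idx) :
    get_curlb s idx = get_curlb_alt s idx := by
  obtain ⟨k, rfl⟩ : ∃ k : Nat, ((k:Int)) = idx := ⟨idx.toNat, Int.toNat_of_nonneg hpre⟩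
  simp only [get_curlb, get_curlb_alt]
  set cs := s.toList with hcs
  have hslice : PySem.List.slice cs (some ((k:Nat):Int)) none = cs.drop k := by
    rw [PySem.List.slice_from cs (by positivity)]; simp
  rw [hslice, pvSkipspc_nat]
  set a := ((cs.drop k).takeWhile (fun c => c == ' ')).length with ha
  have hinner : (cs.drop k).dropWhile (fun c => c == ' ') = cs.drop (k + a) := by
    rw [show (fun c => c == ' ') = (fun c : Char => c == ' ') from rfl]
    rw [pvDropWhile_eq_drop, ← ha, List.drop_drop]
  rw [hinner]
  by_cases hbrace : cs[k + a]? = some '{'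
  · -- a '{' after the spaces: both take the then-branch
    have hlt : k + a < cs.length := by
      have h := List.getElem?_eq_some_iff.mp hbrace
      exact h.choose
    have hgv : cs[k + a] = '{' := by
      have := List.getElem?_eq_getElem hlt
      rw [this] at hbrace; exact Option.some.inj hbrace
    have hdropc : cs.drop (k + a) = '{' :: cs.drop (k + a + 1) := by
      rw [List.drop_eq_getElem_cons hlt, hgv]
    rw [if_pos ⟨by exact_mod_cast hlt, by rw [PySem.List.pyGet?_natCast]; exact hbrace⟩]
    have hsw : PySem.Chars.startswith ('{' :: cs.drop (k + a + 1)) ['{'] = true := by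
      simp [PySem.Chars.startswith_iff]
    rw [hdropc]
    rw [if_pos (c := PySem.Chars.startswith ('{' :: cs.drop (k + a + 1)) ['{'] = true) hsw]
    have h2 : ((k + a : Nat) : Int) + 1 = ((k + a + 1 : Nat) : Int) := by push_cast; ring
    rw [h2, pvSkipspc_nat]
    set b := ((cs.drop (k + a + 1)).takeWhile (fun c => c == ' ')).length with hb
    have hbody : (cs.drop (k + a + 1)).dropWhile (fun c => c == ' ') = cs.drop (k + a + 1 + b) := by
      rw [pvDropWhile_eq_drop, ← hb, List.drop_drop]
    simp only [List.drop_succ_cons, List.drop_zero]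
    rw [hbody, pvCollect_nat]
    set m := k + a + 1 + b with hm
    have hmlen : m ≤ cs.length := by
      have hble : b ≤ (cs.drop (k + a + 1)).length :=
        (List.takeWhile_sublist _).length_le
      rw [List.length_drop] at hble
      omega
    set u := (cs.drop m).takeWhile (fun c => ¬ (c == '}')) with hu
    have hulen : u.length ≤ cs.length - m := by
      have := (List.takeWhile_sublist (l := cs.drop m) (fun c => ¬ (c == '}'))).length_le
      rw [List.length_drop] at this
      exact hu ▸ this
    have hrem : (cs.drop m).dropWhile (fun c => ¬ (c == '}')) = cs.drop (m + u.length) := by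
      rw [pvDropWhile_eq_drop, ← hu, List.drop_drop]
    rw [hrem]
    simp only [List.nil_append]
    rw [pvSkipspc_nat]
    have hsp : (cs.drop (m + u.length)).takeWhile (fun c => c == ' ') = [] := by
      cases hre : cs.drop (m + u.length) with
      | nil => simp
      | cons c tl =>
        have hcb : (fun c : Char => ¬ (c == '}')) c = false := by
          have := List.head_dropWhile_not (fun c : Char => ¬ (c == '}')) (l := cs.drop m)
          rw [hrem] at this
          simp only [hre] at this
          simpa using this (by simp)
        have hc : c = '}' := by simpa using hcb
        simp [hc]
    rw [hsp]
    simp only [List.length_nil, Nat.add_zero]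
    cases hre : cs.drop (m + u.length) with
    | nil =>
      have hge : cs.length ≤ m + u.length := by
        have := congrArg List.length hre
        rw [List.length_drop] at this
        simp at this
        omega
      rw [if_neg (by rintro ⟨h1, -⟩; omega)]
      refine Prod.ext rfl (Prod.ext rfl ?_)
      simp
      omega
    | cons c tl =>
      have hc : c = '}' := by
        have hcb : (fun c : Char => ¬ (c == '}')) c = false := by
          have := List.head_dropWhile_not (fun c : Char => ¬ (c == '}')) (l := cs.drop m)
          rw [hrem] at this
          simp only [hre] at this
          simpa using this (by simp)
        simpa using hcb
      have hlt2 : m + u.length < cs.length := by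
        have := congrArg List.length hre
        rw [List.length_drop] at this
        simp at this
        omega
      have hget2 : cs[m + u.length]? = some '}' := by
        rw [← List.head?_drop, hre, hc]; rfl
      rw [if_pos ⟨by exact_mod_cast hlt2, by rw [PySem.List.pyGet?_natCast]; exact hget2⟩]
      have htl : cs.length - (m + u.length) = tl.length + 1 := by
        have := congrArg List.length hre
        rw [List.length_drop] at this
        simp at this
        omega
      refine Prod.ext rfl (Prod.ext rfl ?_)
      simp
      omega
  · -- no '{': both take the else-branch
    rw [if_neg (by
      rintro ⟨h1, h2⟩
      exact hbrace (by rwa [PySem.List.pyGet?_natCast] at h2))]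
    rw [if_neg (by
      intro h
      rw [PySem.Chars.startswith_iff] at h
      rcases h with ⟨t, ht⟩
      exact hbrace (by rw [← List.head?_drop, ← ht]; rfl))]
    have hlen : (cs.drop k).length = a + ((cs.drop k).dropWhile (fun c => c == ' ')).length := by
      conv_lhs => rw [← List.takeWhile_append_dropWhile (p := fun c => c == ' ') (l := cs.drop k)]
      rw [List.length_append, ha]
    rw [hinner, List.length_drop] at hlen
    refine Prod.ext rfl (Prod.ext rfl ?_)
    simp only [List.length_drop]
    push_cast
    omega

-- ===== VERDICT (by name: the statement is the Claim_ definition above) =====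
theorem get_curlb_spec : Claim_equal_get_curlb := by
  intro s idx _ hpre
  unfold Spec_get_curlb
  exact get_curlb_eq s idx hpre
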